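-- pv_equiv track=rewrite | github.com/elian204/sktr_for_long_traces | src/utils.py | get_run_context_labels
-- ===== SOURCE A (Python) =====
-- from typing import (
--     Any, Callable, Dict, Iterable, List, Optional, Sequence, Tuple, Union
-- )
--
-- def get_run_context_labels(
--     predicted_sequence: Sequence[str]
-- ) -> Tuple[Optional[str], Optional[str]]:
--     """
--     Return the (current_run_label, last_different_label) from a predicted sequence.
--
--     - current_run_label: the label of the final contiguous run (i.e., last element).
--     - last_different_label: the most recent label in the sequence that differs from
--       the current run label (i.e., label of the previous run). If none exists,
--       returns None.
--     """
--     if not predicted_sequence: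
--         return None, None
--
--     current_label = predicted_sequence[-1]
--
--     # Walk backwards to find the last label that differs from the current run
--     i = len(predicted_sequence) - 1
--     while i >= 0 and predicted_sequence[i] == current_label:
--         i -= 1
--
--     last_different = predicted_sequence[i] if i >= 0 else None
--     return current_label, last_different
-- ===== SOURCE B (Python) =====
-- def get_run_context_labels(predicted_sequence):
--     if not predicted_sequence:
--         return None, None
--     current_label = predicted_sequence[-1]
--     last_different = None
--     for x in predicted_sequence:
--         if x != current_label:
--             last_different = x
--     return current_label, last_different
-- ===== Notes on version B (the rewrite author's own statement) =====
-- stated objective: alternative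
-- what changed: Replaces the backward index walk (while-loop decrementing i with early stop) by a single forward pass with an accumulator that keeps the last label differing from the final one.
import Mathlib
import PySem

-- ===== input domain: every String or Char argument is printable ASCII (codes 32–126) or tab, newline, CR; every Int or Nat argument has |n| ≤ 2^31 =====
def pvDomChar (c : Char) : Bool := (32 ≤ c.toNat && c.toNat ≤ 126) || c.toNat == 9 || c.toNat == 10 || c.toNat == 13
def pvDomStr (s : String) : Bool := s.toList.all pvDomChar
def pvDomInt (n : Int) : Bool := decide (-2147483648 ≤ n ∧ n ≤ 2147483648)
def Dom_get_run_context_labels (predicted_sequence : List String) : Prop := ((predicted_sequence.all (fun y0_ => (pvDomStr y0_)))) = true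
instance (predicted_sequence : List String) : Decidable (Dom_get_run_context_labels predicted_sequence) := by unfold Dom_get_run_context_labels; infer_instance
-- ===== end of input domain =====

-- B replaces A's backward index walk by a single forward pass with a "last differing label" accumulator (alternative decomposition, same cost).


-- ===== PORT A =====
-- the backward while-loop: 'while i >= 0 and predicted_sequence[i] == current_label: i -= 1'
def pvWalkA (seq : List String) (cur : String) : Nat → Int → Int
  | 0, i => i
  | fuel + 1, i =>
    if i ≥ 0 ∧ PySem.List.pyGet? seq i = some cur then pvWalkA seq cur fuel (i - 1) else i

def get_run_context_labels (predicted_sequence : List String) : Option String × Option String :=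
  match predicted_sequence with
  | [] => (none, none)
  | x :: xs =>
    let cur := (x :: xs).getLast (by simp)          -- predicted_sequence[-1] on nonempty input
    let i := pvWalkA (x :: xs) cur (x :: xs).length ((x :: xs).length - 1)
    (some cur, if i ≥ 0 then PySem.List.pyGet? (x :: xs) i else none)

-- ===== PORT B =====
def get_run_context_labels_alt (predicted_sequence : List String) : Option String × Option String :=
  match predicted_sequence with
  | [] => (none, none)
  | x :: xs =>
    let cur := (x :: xs).getLast (by simp)          -- predicted_sequence[-1] on nonempty input
    (some cur, (x :: xs).foldl (fun acc y => if y ≠ cur then some y else acc) none)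

-- ===== PRECONDITION & SPEC =====
def Spec_get_run_context_labels (predicted_sequence : List String) (out : Option String × Option String) : Prop := out = get_run_context_labels_alt predicted_sequence
instance (predicted_sequence : List String) (out : Option String × Option String) : Decidable (Spec_get_run_context_labels predicted_sequence out) := by unfold Spec_get_run_context_labels; infer_instance

-- ===== CLAIM (what is proved, stated in full; the proofs are below) =====
def Claim_equal_get_run_context_labels : Prop := ∀ (predicted_sequence : List String), Dom_get_run_context_labels predicted_sequence → Spec_get_run_context_labels predicted_sequence (get_run_context_labels predicted_sequence)

-- ===== LEMMAS AND PROOFS =====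

theorem pvWalkA_succ (seq : List String) (cur : String) (fuel : Nat) (i : Int) :
    pvWalkA seq cur (fuel + 1) i
      = if i ≥ 0 ∧ PySem.List.pyGet? seq i = some cur
        then pvWalkA seq cur fuel (i - 1) else i := rfl

-- B's forward fold computes the first element of the reversed list that differs from cur.
theorem foldl_lastDiff (cur : String) (l : List String) (a : Option String) :
    l.foldl (fun acc y => if y ≠ cur then some y else acc) a
      = (l.reverse.find? (fun y => y != cur)).or a := by
  induction l generalizing a with
  | nil => simp
  | cons x xs ih =>
    simp only [List.foldl_cons, ih, List.reverse_cons, List.find?_append]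
    cases h : xs.reverse.find? (fun y => y != cur) <;>
      by_cases hx : x = cur <;> simp [hx, Option.or]

-- A's backward walk, started at index n with fuel n+1, yields the find? on the reversed prefix.
theorem walkA_spec (seq : List String) (cur : String) (n : Nat) (hn : n < seq.length) :
    (if pvWalkA seq cur (n + 1) (n : Int) ≥ 0
      then PySem.List.pyGet? seq (pvWalkA seq cur (n + 1) (n : Int)) else none)
      = (seq.take (n + 1)).reverse.find? (fun y => y != cur) := by
  induction n with
  | zero =>
    have hget : PySem.List.pyGet? seq ((0 : Nat) : Int) = some seq[0] :=
      PySem.List.pyGet?_ofNat (xs := seq) (n := 0) hn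
    have htake : (seq.take (0 + 1)).reverse = [seq[0]] := by
      rw [List.take_add_one, List.getElem?_eq_getElem hn]
      simp
    by_cases hc : seq[0] = cur
    · have hcond : ((0 : Nat) : Int) ≥ 0 ∧ PySem.List.pyGet? seq ((0 : Nat) : Int) = some cur :=
        ⟨by norm_num, by rw [hget, hc]⟩
      have hw : pvWalkA seq cur (0 + 1) ((0 : Nat) : Int) = -1 := by
        rw [pvWalkA_succ, if_pos hcond]; norm_num [pvWalkA]
      rw [hw, if_neg (by norm_num), htake]
      simp [hc]
    · have hcond : ¬ (((0 : Nat) : Int) ≥ 0 ∧ PySem.List.pyGet? seq ((0 : Nat) : Int) = some cur) := by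
        rintro ⟨-, h⟩
        rw [hget] at h
        exact hc (Option.some.inj h)
      have hw : pvWalkA seq cur (0 + 1) ((0 : Nat) : Int) = ((0 : Nat) : Int) := by
        rw [pvWalkA_succ, if_neg hcond]
      rw [hw, if_pos (by norm_num), hget, htake]
      simp [hc]
  | succ m ih =>
    have hm : m < seq.length := Nat.lt_of_succ_lt hn
    have hget : PySem.List.pyGet? seq ((m + 1 : Nat) : Int) = some seq[m + 1] :=
      PySem.List.pyGet?_ofNat (xs := seq) (n := m + 1) hn
    have htake : (seq.take (m + 1 + 1)).reverse = seq[m + 1] :: (seq.take (m + 1)).reverse := by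
      rw [List.take_add_one, List.getElem?_eq_getElem hn]
      simp
    have hcast : ((m + 1 : Nat) : Int) - 1 = ((m : Nat) : Int) := by push_cast; ring
    by_cases hc : seq[m + 1] = cur
    · have hcond : ((m + 1 : Nat) : Int) ≥ 0 ∧
          PySem.List.pyGet? seq ((m + 1 : Nat) : Int) = some cur :=
        ⟨by positivity, by rw [hget, hc]⟩
      have hw : pvWalkA seq cur (m + 1 + 1) ((m + 1 : Nat) : Int)
          = pvWalkA seq cur (m + 1) ((m : Nat) : Int) := by
        rw [pvWalkA_succ, if_pos hcond, hcast]
      rw [hw, ih hm, htake]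
      simp [hc]
    · have hcond : ¬ (((m + 1 : Nat) : Int) ≥ 0 ∧
          PySem.List.pyGet? seq ((m + 1 : Nat) : Int) = some cur) := by
        rintro ⟨-, h⟩
        rw [hget] at h
        exact hc (Option.some.inj h)
      have hw : pvWalkA seq cur (m + 1 + 1) ((m + 1 : Nat) : Int) = ((m + 1 : Nat) : Int) := by
        rw [pvWalkA_succ, if_neg hcond]
      rw [hw, if_pos (by positivity), hget, htake]
      have hb : (seq[m + 1] != cur) = true := by simpa using hc
      simp [hb]

-- ===== VERDICT (by name: the statement is the Claim_ definition above) =====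
theorem get_run_context_labels_spec : Claim_equal_get_run_context_labels := by
  intro seq _
  unfold Spec_get_run_context_labels get_run_context_labels get_run_context_labels_alt
  cases seq with
  | nil => rfl
  | cons x xs =>
    simp only
    set cur := (x :: xs).getLast (by simp) with hcur
    have hidx : ((x :: xs).length : Int) - 1 = ((xs.length : Nat) : Int) := by
      simp
    have hfuel : (x :: xs).length = xs.length + 1 := by simp
    have hlen : xs.length < (x :: xs).length := by simp
    have hA := walkA_spec (x :: xs) cur xs.length hlen
    have htake : ((x :: xs).take (xs.length + 1)) = x :: xs := by
      rw [← hfuel]; exact List.take_length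
    rw [htake] at hA
    rw [hidx, hfuel, hA, foldl_lastDiff cur (x :: xs) none, Option.or_none]
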